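-- pv_equiv track=rewrite | github.com/jh-lau/leetcode_in_python | 02-算法思想/并查集/839.相似字符串组(H).py | num_similar_groups
-- ===== SOURCE A (Python) =====
-- from typing import List
--
-- def num_similar_groups(strs: List[str]) -> int:
--     n = len(strs)
--     m = len(strs[0])
--     f = list(range(n))
--
--     def find(x: int) -> int:
--         if f[x] == x:
--             return x
--         f[x] = find(f[x])
--         return f[x]
--
--     def check(a: str, b: str) -> bool:
--         num = 0
--         for ac, bc in zip(a, b):
--             if ac != bc:
--                 num += 1
--                 if num > 2:
--                     return False
--         return True
--
--     for i in range(n):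
--         for j in range(i + 1, n):
--             fi, fj = find(i), find(j)
--             if fi == fj:
--                 continue
--             if check(strs[i], strs[j]):
--                 f[fi] = fj
--
--     ret = sum(1 for i in range(n) if f[i] == i)
--     return ret
-- ===== SOURCE B (Python) =====
-- from typing import List
--
-- def num_similar_groups(strs: List[str]) -> int:
--     # quick-find: keep a label per string, merge label classes by relabelling
--     n = len(strs)
--     label = list(range(n))
--     for i in range(n):
--         for j in range(i + 1, n):
--             li, lj = label[i], label[j]
--             if li == lj:
--                 continue
--             mismatch = 0
--             for x, y in zip(strs[i], strs[j]):
--                 if x != y: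
--                     mismatch += 1
--                     if mismatch > 2:
--                         break
--             if mismatch <= 2:
--                 label = [lj if l == li else l for l in label]
--     return len(set(label))
-- ===== Notes on version B (the rewrite author's own statement) =====
-- stated objective: simpler
-- what changed: Union-find with recursive path-compressing find is replaced by a quick-find label list merged by whole-list relabelling (skipping pairs already labelled alike), and root counting by counting distinct labels; B needs no recursion and is shorter.
import Mathlib
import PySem

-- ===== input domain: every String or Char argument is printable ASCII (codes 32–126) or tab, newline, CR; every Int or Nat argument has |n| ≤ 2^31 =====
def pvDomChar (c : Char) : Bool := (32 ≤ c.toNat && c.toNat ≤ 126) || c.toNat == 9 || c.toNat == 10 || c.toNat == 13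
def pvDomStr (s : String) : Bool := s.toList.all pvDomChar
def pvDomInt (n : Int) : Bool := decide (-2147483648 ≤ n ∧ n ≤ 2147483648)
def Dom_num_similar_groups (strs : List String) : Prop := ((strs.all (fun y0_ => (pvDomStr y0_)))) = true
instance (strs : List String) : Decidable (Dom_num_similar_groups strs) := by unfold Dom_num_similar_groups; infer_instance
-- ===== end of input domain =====

-- B replaces A's union-find (recursive path-compressing find) by a shorter quick-find
-- label list merged by relabelling, and counts distinct labels; return-value equivalence only.

-- ===== PORT A =====

-- f[x] (always used with x a valid index)
def pvPar (f : List Nat) (x : Nat) : Nat := f.getD x x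

-- Python's recursive `find` with path compression; fuel n is enough (proved below).
def pvFind : Nat → List Nat → Nat → Nat × List Nat
  | 0, f, x => (x, f)
  | fuel+1, f, x =>
    if pvPar f x = x then (x, f)
    else
      let r := pvFind fuel f (pvPar f x)
      (r.1, r.2.set x r.1)

-- Python's `check`, iterating zip(a, b) with counter `num` and early return False.
def pvCheck : List (Char × Char) → Nat → Bool
  | [], _ => true
  | p :: rest, num =>
    if p.1 ≠ p.2 then
      if num + 1 > 2 then false else pvCheck rest (num + 1)
    else pvCheck rest num

-- body of A's inner loop for the pair (i, j)
def pvStepA (strs : List String) (n : Nat) (f : List Nat) (i j : Nat) : List Nat :=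
  let r1 := pvFind n f i
  let r2 := pvFind n r1.2 j
  if r1.1 = r2.1 then r2.2
  else if pvCheck ((strs.getD i "").toList.zip (strs.getD j "").toList) 0 then
    r2.2.set r1.1 r2.1
  else r2.2

def num_similar_groups (strs : List String) : Int :=
  let n := strs.length
  let f := (List.range n).foldl
    (fun f i => (List.range' (i+1) (n - (i+1))).foldl (fun f j => pvStepA strs n f i j) f)
    (List.range n)
  (List.range n).foldl (fun (s : Int) i => if pvPar f i = i then s + 1 else s) 0

-- ===== PORT B =====

-- B's mismatch loop over zip(a, b): count differing positions, break past 2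
def pvMis : List (Char × Char) → Nat → Nat
  | [], m => m
  | p :: rest, m =>
    if p.1 ≠ p.2 then
      if m + 1 > 2 then m + 1 else pvMis rest (m + 1)
    else pvMis rest m

-- body of B's inner loop for the pair (i, j): merge the two label classes
def pvStepB (strs : List String) (label : List Nat) (i j : Nat) : List Nat :=
  let li := label.getD i 0
  let lj := label.getD j 0
  if li = lj then label
  else if pvMis ((strs.getD i "").toList.zip (strs.getD j "").toList) 0 ≤ 2 then
    label.map (fun l => if l = li then lj else l)
  else label

def num_similar_groups_alt (strs : List String) : Int :=
  let n := strs.length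
  let label := (List.range n).foldl
    (fun lab i => (List.range' (i+1) (n - (i+1))).foldl (fun lab j => pvStepB strs lab i j) lab)
    (List.range n)
  ((PySem.Set.ofList label).length : Int)

-- ===== PRECONDITION & SPEC =====

-- Pre_ excludes only the empty list, on which A raises IndexError (len(strs[0])).
def Pre_num_similar_groups (strs : List String) : Prop := strs ≠ []
instance (strs : List String) : Decidable (Pre_num_similar_groups strs) := by
  unfold Pre_num_similar_groups; infer_instance

def pvWitness_num_similar_groups : List String := ["abc", "acb", "xyz"]

def Spec_num_similar_groups (strs : List String) (out : Int) : Prop := out = num_similar_groups_alt strs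
instance (strs : List String) (out : Int) : Decidable (Spec_num_similar_groups strs out) := by
  unfold Spec_num_similar_groups; infer_instance

-- ===== CLAIM (what is proved, stated in full; the proofs are below) =====
def Claim_equal_num_similar_groups : Prop := ∀ (strs : List String), Dom_num_similar_groups strs → Pre_num_similar_groups strs → Spec_num_similar_groups strs (num_similar_groups strs)

-- ===== LEMMAS AND PROOFS =====

-- root of x in parent list f, computed with fuel (no compression)
def prootA : Nat → List Nat → Nat → Nat
  | 0, _, x => x
  | k+1, f, x => if pvPar f x = x then x else prootA k f (pvPar f x)

-- forest invariant: parents in range, and a rank certificate of acyclicity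
def Good (n : Nat) (f : List Nat) (rank : Nat → Nat) : Prop :=
  f.length = n ∧ (∀ x, x < n → pvPar f x < n) ∧
    (∀ x, x < n → pvPar f x ≠ x → rank x < rank (pvPar f x))

-- simulation invariant between A's parent list and B's label list
def StateRel (n : Nat) (f label : List Nat) : Prop :=
  label.length = n ∧
    ∃ rank, Good n f rank ∧ ∀ x, x < n → label.getD x 0 = prootA n f x

theorem prootA_root (k : Nat) (f : List Nat) (x : Nat) (h : pvPar f x = x) :
    prootA k f x = x := by
  induction k with
  | zero => rfl
  | succ k ih => simp [prootA, h]

theorem prootA_stab (k : Nat) : ∀ (m : Nat) (f : List Nat) (x : Nat),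
    pvPar f (prootA k f x) = prootA k f x → k ≤ m → prootA m f x = prootA k f x := by
  induction k with
  | zero =>
    intro m f x h _
    exact prootA_root m f x h
  | succ k ih =>
    intro m f x h hkm
    by_cases hr : pvPar f x = x
    · rw [prootA_root m f x hr, prootA_root (k+1) f x hr]
    · obtain ⟨m', rfl⟩ : ∃ m', m = m' + 1 := ⟨m - 1, by omega⟩
      rw [prootA] at h ⊢
      rw [if_neg hr] at h ⊢
      rw [prootA, if_neg hr]
      exact ih m' f (pvPar f x) h (by omega)

theorem card_step {n : Nat} (rank : Nat → Nat) {y p : Nat} (hp : p < n) (hr : rank y < rank p) :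
    ((Finset.range n).filter (fun z => rank p < rank z)).card
      < ((Finset.range n).filter (fun z => rank y < rank z)).card := by
  apply Finset.card_lt_card
  constructor
  · intro z hz
    simp only [Finset.mem_filter, Finset.mem_range] at hz ⊢
    exact ⟨hz.1, lt_trans hr hz.2⟩
  · intro hsub
    have hpmem : p ∈ (Finset.range n).filter (fun z => rank y < rank z) := by
      simp [Finset.mem_filter, Finset.mem_range, hp, hr]
    have := hsub hpmem
    simp [Finset.mem_filter] at this

theorem forest_ind {n : Nat} {f : List Nat} {rank : Nat → Nat} (hg : Good n f rank)
    (P : Nat → Prop)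
    (hroot : ∀ y, y < n → pvPar f y = y → P y)
    (hstep : ∀ y, y < n → pvPar f y ≠ y → P (pvPar f y) → P y) :
    ∀ y, y < n → P y := by
  obtain ⟨hlen, hbnd, hrk⟩ := hg
  suffices h : ∀ m y, y < n → ((Finset.range n).filter (fun z => rank y < rank z)).card < m → P y by
    intro y hy
    exact h (((Finset.range n).filter (fun z => rank y < rank z)).card + 1) y hy (by omega)
  intro m
  induction m with
  | zero => intro y _ h; omega
  | succ m ih =>
    intro y hy hc
    by_cases hr : pvPar f y = y
    · exact hroot y hy hr
    · exact hstep y hy hr (ih (pvPar f y) (hbnd y hy)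
        (by have := card_step (n := n) rank (hbnd y hy) (hrk y hy hr); omega))

theorem good_reach {n : Nat} {f : List Nat} {rank : Nat → Nat} (hg : Good n f rank) :
    ∀ x, x < n → ∃ k, k < n ∧ pvPar f (prootA k f x) = prootA k f x := by
  obtain ⟨hlen, hbnd, hrk⟩ := hg
  suffices h : ∀ m x, x < n → ((Finset.range n).filter (fun z => rank x < rank z)).card < m →
      ∃ k, k ≤ ((Finset.range n).filter (fun z => rank x < rank z)).card ∧
        pvPar f (prootA k f x) = prootA k f x by
    intro x hx
    obtain ⟨k, hk, hr⟩ := h (((Finset.range n).filter (fun z => rank x < rank z)).card + 1) x hx (by omega)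
    refine ⟨k, ?_, hr⟩
    have hsub : (Finset.range n).filter (fun z => rank x < rank z) ⊆ (Finset.range n).erase x := by
      intro z hz
      simp only [Finset.mem_filter, Finset.mem_range] at hz
      refine Finset.mem_erase.mpr ⟨?_, Finset.mem_range.mpr hz.1⟩
      intro hzx; subst hzx; exact absurd hz.2 (lt_irrefl _)
    have := Finset.card_le_card hsub
    rw [Finset.card_erase_of_mem (Finset.mem_range.mpr hx), Finset.card_range] at this
    omega
  intro m
  induction m with
  | zero => intro x _ h; omega
  | succ m ih =>
    intro x hx hc
    by_cases hr : pvPar f x = x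
    · exact ⟨0, by omega, by simpa [prootA] using hr⟩
    · have hp := hbnd x hx
      have hcs := card_step (n := n) rank hp (hrk x hx hr)
      obtain ⟨k, hk, hkr⟩ := ih (pvPar f x) hp (by omega)
      refine ⟨k + 1, by omega, ?_⟩
      rw [prootA, if_neg hr]
      exact hkr

theorem root_isRoot {n : Nat} {f : List Nat} {rank : Nat → Nat} (hg : Good n f rank)
    {x : Nat} (hx : x < n) : pvPar f (prootA n f x) = prootA n f x := by
  obtain ⟨k, hk, hr⟩ := good_reach hg x hx
  rw [prootA_stab k n f x hr (by omega)]
  exact hr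

theorem root_step {n : Nat} {f : List Nat} {rank : Nat → Nat} (hg : Good n f rank)
    {x : Nat} (hx : x < n) (hne : pvPar f x ≠ x) :
    prootA n f x = prootA n f (pvPar f x) := by
  have hp : pvPar f x < n := hg.2.1 x hx
  obtain ⟨k, hk, hr⟩ := good_reach hg (pvPar f x) hp
  have h1 : prootA (k+1) f x = prootA k f (pvPar f x) := by rw [prootA, if_neg hne]
  have hroot1 : pvPar f (prootA (k+1) f x) = prootA (k+1) f x := by rw [h1]; exact hr
  rw [prootA_stab (k+1) n f x hroot1 (by omega), h1, prootA_stab k n f (pvPar f x) hr (by omega)]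

theorem root_lt {n : Nat} {f : List Nat} {rank : Nat → Nat} (hg : Good n f rank)
    {x : Nat} (hx : x < n) : prootA n f x < n := by
  refine forest_ind hg (fun y => prootA n f y < n) ?_ ?_ x hx
  · intro y hy hr; rw [prootA_root n f y hr]; exact hy
  · intro y hy hne ih; rw [root_step hg hy hne]; exact ih

theorem root_rank {n : Nat} {f : List Nat} {rank : Nat → Nat} (hg : Good n f rank)
    {x : Nat} (hx : x < n) (hne : pvPar f x ≠ x) : rank x < rank (prootA n f x) := by
  have hrk := hg.2.2
  refine forest_ind hg (fun y => pvPar f y ≠ y → rank y < rank (prootA n f y)) ?_ ?_ x hx hne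
  · intro y _ hr hne'; exact absurd hr hne'
  · intro y hy hne' ih _
    rw [root_step hg hy hne']
    by_cases hpr : pvPar f (pvPar f y) = pvPar f y
    · rw [prootA_root n f _ hpr]; exact hrk y hy hne'
    · exact lt_trans (hrk y hy hne') (ih hpr)

theorem root_fix {n : Nat} {f : List Nat} {rank : Nat → Nat} (hg : Good n f rank)
    {x : Nat} (hx : x < n) : prootA n f x = x ↔ pvPar f x = x := by
  constructor
  · intro h
    by_contra hne
    have := root_rank hg hx hne
    rw [h] at this
    exact absurd this (lt_irrefl _)
  · intro h; exact prootA_root n f x h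


theorem pvPar_set_self {f : List Nat} {x : Nat} (hx : x < f.length) (r : Nat) :
    pvPar (f.set x r) x = r := by
  simp [pvPar, List.getD, hx]
theorem pvPar_set_ne (f : List Nat) {x y : Nat} (hxy : y ≠ x) (r : Nat) :
    pvPar (f.set x r) y = pvPar f y := by
  simp [pvPar, List.getD, List.getElem?_set_ne (Ne.symm hxy)]

theorem set_root_good {n : Nat} {f : List Nat} {rank : Nat → Nat} (hg : Good n f rank)
    {x : Nat} (hx : x < n) (hne : pvPar f x ≠ x) :
    Good n (f.set x (prootA n f x)) rank := by
  obtain ⟨hlen, hbnd, hrk⟩ := hg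
  have hg' : Good n f rank := ⟨hlen, hbnd, hrk⟩
  refine ⟨by simp [hlen], ?_, ?_⟩
  · intro y hy
    by_cases hyx : y = x
    · subst hyx
      rw [pvPar_set_self (by omega) _]
      exact root_lt hg' hy
    · rw [pvPar_set_ne f hyx]; exact hbnd y hy
  · intro y hy hne'
    by_cases hyx : y = x
    · subst hyx
      rw [pvPar_set_self (by omega) _]
      exact root_rank hg' hy hne
    · rw [pvPar_set_ne f hyx] at hne' ⊢
      exact hrk y hy hne'

theorem root_ne_of_ne {n : Nat} {f : List Nat} {rank : Nat → Nat} (hg : Good n f rank)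
    {x : Nat} (hx : x < n) (hne : pvPar f x ≠ x) : prootA n f x ≠ x := by
  intro h
  exact hne ((root_fix hg hx).mp h)

theorem set_root_preserve {n : Nat} {f : List Nat} {rank : Nat → Nat} (hg : Good n f rank)
    {x : Nat} (hx : x < n) (hne : pvPar f x ≠ x) :
    ∀ y, y < n → prootA n (f.set x (prootA n f x)) y = prootA n f y := by
  have hlen := hg.1
  have hg2 := set_root_good hg hx hne
  have hrne : prootA n f x ≠ x := root_ne_of_ne hg hx hne
  have hrootr : pvPar f (prootA n f x) = prootA n f x := root_isRoot hg hx
  refine forest_ind hg2 (fun y => prootA n (f.set x (prootA n f x)) y = prootA n f y) ?_ ?_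
  · -- root in the new forest
    intro y hy hr
    have hyx : y ≠ x := by
      intro h; subst h
      rw [pvPar_set_self (by omega) _] at hr
      exact hrne hr
    rw [pvPar_set_ne f hyx] at hr
    rw [prootA_root n _ y ((pvPar_set_ne f hyx _).trans hr), prootA_root n f y hr]
  · intro y hy hne2 ih
    rw [root_step hg2 hy hne2]
    by_cases hyx : y = x
    · subst hyx
      rw [pvPar_set_self (by omega) _] at ih ⊢
      rw [ih, prootA_root n f _ hrootr]
    · rw [pvPar_set_ne f hyx] at ih hne2 ⊢
      rw [ih, ← root_step hg hy hne2]

theorem union_good {n : Nat} {f : List Nat} {rank : Nat → Nat} (hg : Good n f rank)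
    {fi fj : Nat} (hfi : fi < n) (hfj : fj < n)
    (hri : pvPar f fi = fi) (hrj : pvPar f fj = fj) (hne : fi ≠ fj) :
    Good n (f.set fi fj)
      (fun y => if prootA n f y = fj then rank y + rank fi + 1 else rank y) := by
  obtain ⟨hlen, hbnd, hrk⟩ := hg
  have hg' : Good n f rank := ⟨hlen, hbnd, hrk⟩
  refine ⟨by simp [hlen], ?_, ?_⟩
  · intro y hy
    by_cases hyx : y = fi
    · subst hyx; rw [pvPar_set_self (by omega) _]; exact hfj
    · rw [pvPar_set_ne f hyx]; exact hbnd y hy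
  · intro y hy hne'
    dsimp only
    by_cases hyx : y = fi
    · rw [hyx] at hne' ⊢
      rw [pvPar_set_self (by omega) _] at hne' ⊢
      rw [prootA_root n f _ hri, prootA_root n f _ hrj, if_neg hne, if_pos rfl]
      omega
    · rw [pvPar_set_ne f hyx] at hne' ⊢
      have hstep := root_step hg' hy hne'
      have h0 := hrk y hy hne'
      by_cases hc : prootA n f y = fj
      · rw [if_pos hc, if_pos (by rw [← hstep]; exact hc)]
        omega
      · rw [if_neg hc, if_neg (by rw [← hstep]; exact hc)]
        exact h0

theorem union_roots {n : Nat} {f : List Nat} {rank : Nat → Nat} (hg : Good n f rank)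
    {fi fj : Nat} (hfi : fi < n) (hfj : fj < n)
    (hri : pvPar f fi = fi) (hrj : pvPar f fj = fj) (hne : fi ≠ fj) :
    ∀ y, y < n → prootA n (f.set fi fj) y =
      if prootA n f y = fi then fj else prootA n f y := by
  have hlen := hg.1
  have hg2 := union_good hg hfi hfj hri hrj hne
  have hfj2 : pvPar (f.set fi fj) fj = fj := by
    rw [pvPar_set_ne f (Ne.symm hne)]; exact hrj
  refine forest_ind hg2 (fun y => prootA n (f.set fi fj) y = if prootA n f y = fi then fj else prootA n f y) ?_ ?_
  · intro y hy hr
    have hyx : y ≠ fi := by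
      intro h; subst h
      rw [pvPar_set_self (by omega) _] at hr
      exact hne hr.symm
    rw [pvPar_set_ne f hyx] at hr
    rw [prootA_root n _ y ((pvPar_set_ne f hyx _).trans hr), prootA_root n f y hr, if_neg hyx]
  · intro y hy hne2 ih
    rw [root_step hg2 hy hne2]
    by_cases hyx : y = fi
    · rw [hyx] at ih ⊢
      rw [pvPar_set_self (by omega) _] at ih ⊢
      rw [prootA_root n f _ hrj] at ih
      rw [if_neg (fun h => hne h.symm)] at ih
      rw [ih, prootA_root n f _ hri, if_pos rfl]
    · rw [pvPar_set_ne f hyx] at ih hne2 ⊢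
      rw [ih, ← root_step hg hy hne2]


theorem find_spec {n : Nat} {rank : Nat → Nat} :
    ∀ (fuel : Nat) (f : List Nat) (x : Nat), Good n f rank → x < n →
    (∃ k, k < fuel ∧ pvPar f (prootA k f x) = prootA k f x) →
    (pvFind fuel f x).1 = prootA n f x ∧
    Good n (pvFind fuel f x).2 rank ∧
    (∀ y, y < n → prootA n (pvFind fuel f x).2 y = prootA n f y) ∧
    (∀ y, pvPar (pvFind fuel f x).2 y = y ↔ pvPar f y = y) := by
  intro fuel
  induction fuel with
  | zero => intro f x _ _ ⟨k, hk, _⟩; omega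
  | succ fuel ih =>
    intro f x hg hx ⟨k, hk, hkr⟩
    by_cases hr : pvPar f x = x
    · rw [pvFind, if_pos hr]
      exact ⟨(prootA_root n f x hr).symm, hg, fun y _ => rfl, fun y => Iff.rfl⟩
    · have hp : pvPar f x < n := hg.2.1 x hx
      have hk' : ∃ k', k' < fuel ∧ pvPar f (prootA k' f (pvPar f x)) = prootA k' f (pvPar f x) := by
        obtain ⟨k0, rfl⟩ : ∃ k0, k = k0 + 1 := by
          refine ⟨k - 1, ?_⟩
          rcases Nat.eq_zero_or_pos k with h0 | h0
          · subst h0; simp [prootA] at hkr; exact absurd hkr hr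
          · omega
        rw [prootA, if_neg hr] at hkr
        exact ⟨k0, by omega, hkr⟩
      obtain ⟨ih1, ih2, ih3, ih4⟩ := ih f (pvPar f x) hg hp hk'
      set f1 := (pvFind fuel f (pvPar f x)).2 with hf1
      set r := (pvFind fuel f (pvPar f x)).1 with hrdef
      have hlen1 : f1.length = n := ih2.1
      have hrval : r = prootA n f x := by rw [ih1, ← root_step hg hx hr]
      have hrroot_f : pvPar f r = r := by rw [hrval]; exact root_isRoot hg hx
      have hrlt : r < n := by rw [hrval]; exact root_lt hg hx
      have hrne : r ≠ x := by rw [hrval]; exact root_ne_of_ne hg hx hr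
      have hne1 : pvPar f1 x ≠ x := fun h => hr ((ih4 x).mp h)
      have hrval1 : prootA n f1 x = r := by rw [ih3 x hx, hrval]
      have hres : pvFind (fuel+1) f x = (r, f1.set x r) := by
        rw [pvFind, if_neg hr]
      rw [hres]
      refine ⟨hrval, ?_, ?_, ?_⟩
      · have := set_root_good ih2 hx hne1
        rwa [hrval1] at this
      · intro y hy
        have := set_root_preserve ih2 hx hne1 y hy
        rw [hrval1] at this
        rw [this, ih3 y hy]
      · intro y
        by_cases hyx : y = x
        · subst hyx
          constructor
          · intro h
            rw [pvPar_set_self (by omega) _] at h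
            exact absurd h hrne
          · intro h; exact absurd h hr
        · rw [pvPar_set_ne f1 hyx]
          exact ih4 y


theorem pvCheck_count (l : List (Char × Char)) : ∀ k, k ≤ 2 →
    (pvCheck l k = true ↔ k + l.countP (fun p => decide ¬ p.1 = p.2) ≤ 2) := by
  induction l with
  | nil => intro k hk; simp [pvCheck]; omega
  | cons p rest ih =>
    intro k hk
    by_cases h : p.1 = p.2
    · simp [pvCheck, h, List.countP_cons, ih k hk]
    · by_cases h2 : k + 1 > 2
      · simp [pvCheck, h, h2, List.countP_cons]
        omega
      · simp only [pvCheck, h, if_neg h2, List.countP_cons]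
        simp only [ne_eq, h, not_false_eq_true, if_true, decide_true]
        rw [ih (k+1) (by omega)]
        omega

theorem pvMis_le2 (l : List (Char × Char)) : ∀ k, k ≤ 2 →
    (pvMis l k ≤ 2 ↔ k + l.countP (fun p => decide ¬ p.1 = p.2) ≤ 2) := by
  induction l with
  | nil => intro k hk; simp [pvMis]
  | cons p rest ih =>
    intro k hk
    have hcons : pvMis (p :: rest) k =
        if p.1 ≠ p.2 then (if k + 1 > 2 then k + 1 else pvMis rest (k + 1))
        else pvMis rest k := rfl
    by_cases h : p.1 = p.2
    · rw [hcons, if_neg (by simp [h])]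
      simp [List.countP_cons, h, ih k hk]
    · rw [hcons, if_pos (by simp [h])]
      simp only [List.countP_cons]
      by_cases h2 : k + 1 > 2
      · rw [if_pos h2]
        simp [h]
        omega
      · rw [if_neg h2, ih (k+1) (by omega)]
        simp [h]
        omega

theorem check_eq_mis (a b : String) :
    pvCheck (a.toList.zip b.toList) 0 = decide (pvMis (a.toList.zip b.toList) 0 ≤ 2) := by
  have h1 := pvCheck_count (a.toList.zip b.toList) 0 (by omega)
  have h2 := pvMis_le2 (a.toList.zip b.toList) 0 (by omega)
  by_cases hm : pvMis (a.toList.zip b.toList) 0 ≤ 2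
  · rw [decide_eq_true hm]
    exact h1.mpr (h2.mp hm)
  · rw [decide_eq_false hm]
    rcases hc : pvCheck (a.toList.zip b.toList) 0
    · rfl
    · exact absurd (h2.mpr (h1.mp hc)) hm

theorem getD_map_of_lt (l : List Nat) (g : Nat → Nat) {y : Nat} (hy : y < l.length) (d : Nat) :
    (l.map g).getD y d = g (l.getD y d) := by
  simp [List.getD, List.getElem?_map, List.getElem?_eq_getElem hy]

theorem count_fold (P : Nat → Prop) [DecidablePred P] (L : List Nat) : ∀ (s : Int),
    L.foldl (fun (s : Int) i => if P i then s + 1 else s) s = s + (L.filter (fun i => decide (P i))).length := by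
  induction L with
  | nil => intro s; simp
  | cons a L ih =>
    intro s
    by_cases h : P a
    · simp [List.foldl, h, ih]
      push_cast; ring
    · simp [List.foldl, h, ih]

theorem step_sim {strs : List String} {n : Nat}
    {f label : List Nat} {i j : Nat} (hi : i < n) (hj : j < n)
    (h : StateRel n f label) :
    StateRel n (pvStepA strs n f i j) (pvStepB strs label i j) := by
  unfold pvStepA pvStepB
  rw [check_eq_mis]
  dsimp only
  obtain ⟨hlab, rank, hg, hrel⟩ := h
  obtain ⟨h1a, h1g, h1r, h1fix⟩ := find_spec n f i hg hi (good_reach hg i hi)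
  obtain ⟨h2a, h2g, h2r, h2fix⟩ := find_spec n (pvFind n f i).2 j h1g hj
    (good_reach h1g j hj)
  set f1 := (pvFind n f i).2 with hf1def
  set fi := (pvFind n f i).1 with hfidef
  set f2 := (pvFind n f1 j).2 with hf2def
  set fj := (pvFind n f1 j).1 with hfjdef
  have hfi : fi = prootA n f i := h1a
  have hfj : fj = prootA n f j := by rw [h2a, h1r j hj]
  have hroots2 : ∀ y, y < n → prootA n f2 y = prootA n f y :=
    fun y hy => (h2r y hy).trans (h1r y hy)
  have hfix2 : ∀ y, pvPar f2 y = y ↔ pvPar f y = y := fun y => (h2fix y).trans (h1fix y)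
  have hreli : label.getD i 0 = fi := by rw [hrel i hi, hfi]
  have hrelj : label.getD j 0 = fj := by rw [hrel j hj, hfj]
  have hrel2 : ∀ x, x < n → label.getD x 0 = prootA n f2 x :=
    fun x hx => (hrel x hx).trans (hroots2 x hx).symm
  rw [hreli, hrelj]
  by_cases hfifj : fi = fj
  · rw [if_pos hfifj, if_pos hfifj]
    exact ⟨hlab, rank, h2g, hrel2⟩
  · rw [if_neg hfifj, if_neg hfifj]
    by_cases hsim : pvMis ((strs.getD i "").toList.zip (strs.getD j "").toList) 0 ≤ 2
    · rw [if_pos (by simpa using hsim), if_pos hsim]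
      have hfilt : fi < n := by rw [hfi]; exact root_lt hg hi
      have hfjlt : fj < n := by rw [hfj]; exact root_lt hg hj
      have hfir : pvPar f2 fi = fi := (hfix2 fi).mpr (by rw [hfi]; exact root_isRoot hg hi)
      have hfjr : pvPar f2 fj = fj := (hfix2 fj).mpr (by rw [hfj]; exact root_isRoot hg hj)
      refine ⟨by simpa using hlab, _, union_good h2g hfilt hfjlt hfir hfjr hfifj, ?_⟩
      intro x hx
      rw [union_roots h2g hfilt hfjlt hfir hfjr hfifj x hx]
      rw [getD_map_of_lt label _ (by omega) 0, hrel2 x hx]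
    · rw [if_neg (by simpa using hsim), if_neg hsim]
      exact ⟨hlab, rank, h2g, hrel2⟩

theorem loops_sim {strs : List String} {n : Nat} :
    ∀ (L : List Nat), (∀ p ∈ L, p < n) → ∀ (f label : List Nat), StateRel n f label →
    StateRel n
      (L.foldl (fun f i => (List.range' (i+1) (n - (i+1))).foldl (fun f j => pvStepA strs n f i j) f) f)
      (L.foldl (fun lab i => (List.range' (i+1) (n - (i+1))).foldl (fun lab j => pvStepB strs lab i j) lab) label) := by
  have inner : ∀ (i : Nat), i < n → ∀ (M : List Nat), (∀ q ∈ M, q < n) →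
      ∀ (f label : List Nat), StateRel n f label →
      StateRel n (M.foldl (fun f j => pvStepA strs n f i j) f)
        (M.foldl (fun lab j => pvStepB strs lab i j) label) := by
    intro i hi M
    induction M with
    | nil => intro _ f label h; exact h
    | cons q M ih =>
      intro hq f label h
      exact ih (fun x hx => hq x (List.mem_cons_of_mem q hx))
        _ _ (step_sim hi (hq q (List.mem_cons_self)) h)
  intro L
  induction L with
  | nil => intro _ f label h; exact h
  | cons p L ih =>
    intro hp f label h
    have hpn : p < n := hp p (List.mem_cons_self)
    refine ih (fun x hx => hp x (List.mem_cons_of_mem p hx)) _ _ ?_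
    refine inner p hpn _ ?_ f label h
    intro q hq
    have := List.mem_range'_1.mp hq
    omega

theorem pvPar_range (n : Nat) {x : Nat} (hx : x < n) : pvPar (List.range n) x = x := by
  simp [pvPar, List.getD, List.getElem?_range, hx]

theorem state_rel_init (n : Nat) : StateRel n (List.range n) (List.range n) := by
  refine ⟨List.length_range, fun _ => 0, ⟨List.length_range, ?_, ?_⟩, ?_⟩
  · intro x hx; rw [pvPar_range n hx]; exact hx
  · intro x hx hne; exact absurd (pvPar_range n hx) hne
  · intro x hx
    rw [prootA_root n _ x (pvPar_range n hx)]
    simp [List.getD, List.getElem?_range, hx]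

theorem final_count {n : Nat} {f label : List Nat} (h : StateRel n f label) :
    (List.range n).foldl (fun (s : Int) i => if pvPar f i = i then s + 1 else s) 0 =
      ((PySem.Set.ofList label).length : Int) := by
  obtain ⟨hlab, rank, hg, hrel⟩ := h
  rw [count_fold (fun i => pvPar f i = i) (List.range n) 0]
  have hmem : ∀ a, a ∈ PySem.Set.ofList label ↔
      a ∈ (List.range n).filter (fun i => decide (pvPar f i = i)) := by
    intro a
    rw [PySem.Set.mem_ofList, List.mem_filter, List.mem_range]
    constructor
    · intro ha
      obtain ⟨x, hx, hxa⟩ := List.mem_iff_getElem.mp ha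
      have hxn : x < n := by omega
      have : label.getD x 0 = a := by rw [List.getD_eq_getElem label 0 hx]; exact hxa
      rw [hrel x hxn] at this
      subst this
      exact ⟨root_lt hg hxn, by simp [root_isRoot hg hxn]⟩
    · intro ⟨han, har⟩
      have := hrel a han
      rw [prootA_root n f a (by simpa using har)] at this
      have hlen : a < label.length := by omega
      rw [List.getD_eq_getElem label 0 hlen] at this
      exact this ▸ List.getElem_mem hlen
  have hperm : (PySem.Set.ofList label).Perm
      ((List.range n).filter (fun i => decide (pvPar f i = i))) := by
    rw [List.perm_ext_iff_of_nodup (PySem.Set.nodup_ofList label)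
      (List.Nodup.filter _ (List.nodup_range))]
    exact hmem
  rw [← hperm.length_eq]
  simp

-- ===== VERDICT (by name: the statement is the Claim_ definition above) =====
theorem num_similar_groups_spec : Claim_equal_num_similar_groups := by
  intro strs _hdom _hpre
  unfold Spec_num_similar_groups num_similar_groups num_similar_groups_alt
  exact final_count (loops_sim (List.range strs.length)
    (by intro p hp; exact List.mem_range.mp hp) _ _ (state_rel_init _))
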